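-- pv_equiv track=rewrite | github.com/XanderRobbins/TheGreatCommission | scripture-translate/inference/confidence_scorer.py | _detect_repetition_collapse
-- ===== SOURCE A (Python) =====
-- from typing import Dict, Optional, Tuple
--
-- def _detect_repetition_collapse(text: str) -> bool:
--     """Return True if any word-trigram repeats 3+ times (degenerate loop)."""
--     words = text.split()
--     if len(words) < 9:
--         return False
--     seen: Dict[tuple, int] = {}
--     for i in range(len(words) - 2):
--         tg = (words[i], words[i + 1], words[i + 2])
--         seen[tg] = seen.get(tg, 0) + 1
--         if seen[tg] >= 3:
--             return True
--     return False
-- ===== SOURCE B (Python) =====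
-- def _detect_repetition_collapse(text: str) -> bool:
--     """Sort-then-scan: a trigram occurs 3+ times iff the sorted trigram-key
--     list has equal entries two apart.  Words contain no whitespace, so
--     joining with ' ' is an injective key for a trigram."""
--     words = text.split()
--     if len(words) < 9:
--         return False
--     keys = sorted(' '.join(t) for t in zip(words, words[1:], words[2:]))
--     return any(keys[i] == keys[i + 2] for i in range(len(keys) - 2))
-- ===== Notes on version B (the rewrite author's own statement) =====
-- stated objective: alternative
-- what changed: Replaces A's fused hash-dict count-and-early-exit loop by sort-then-scan: build one sorted list of (injectively space-joined) trigram keys and detect a 3+-repetition as two equal entries two positions apart.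
import Mathlib
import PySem

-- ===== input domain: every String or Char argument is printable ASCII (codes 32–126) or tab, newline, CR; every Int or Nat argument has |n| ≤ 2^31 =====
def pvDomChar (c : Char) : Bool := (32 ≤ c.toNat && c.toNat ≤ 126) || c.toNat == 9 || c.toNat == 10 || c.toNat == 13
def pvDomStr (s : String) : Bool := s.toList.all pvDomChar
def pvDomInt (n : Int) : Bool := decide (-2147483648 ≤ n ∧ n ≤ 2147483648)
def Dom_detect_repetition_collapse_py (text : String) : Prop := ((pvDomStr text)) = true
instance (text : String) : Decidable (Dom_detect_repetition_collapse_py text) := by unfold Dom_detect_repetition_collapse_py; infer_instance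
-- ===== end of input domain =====

-- B replaces A's fused dict-count loop with sort-then-scan over space-joined trigram keys; objective: alternative (not claimed faster).

-- ===== PORT A =====
-- the 'for i in range(len(words) - 2)' loop with early 'return True' (dict 'seen' of trigram counts)
def pvALoop (words : List String) (idxs : List Int)
    (seen : PySem.Dict (String × String × String) Int) : Bool :=
  match idxs with
  | [] => false
  | i :: rest =>
    let tg := (PySem.List.pyGetD words i "", PySem.List.pyGetD words (i + 1) "",
               PySem.List.pyGetD words (i + 2) "")
    let c := seen.getD tg 0 + 1          -- seen[tg] = seen.get(tg, 0) + 1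
    let seen' := seen.insert tg c
    if 3 ≤ c then true                    -- if seen[tg] >= 3: return True
    else pvALoop words rest seen'

def detect_repetition_collapse_py (text : String) : Bool :=
  let words := PySem.Str.split₀ text
  if (words.length : Int) < 9 then false
  else pvALoop words (PySem.List.pyRange 0 ((words.length : Int) - 2) 1) PySem.Dict.empty

-- ===== PORT B =====
-- ' '.join(t) for a trigram triple t
def pvJoinKey (t : String × String × String) : String :=
  PySem.Str.join " " [t.1, t.2.1, t.2.2]

def detect_repetition_collapse_py_alt (text : String) : Bool :=
  let words := PySem.Str.split₀ text
  if (words.length : Int) < 9 then false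
  else
    let keys := PySem.List.sorted
      ((words.zip ((PySem.List.slice words (some 1) none).zip
                   (PySem.List.slice words (some 2) none))).map pvJoinKey)
      (fun k => k) false
    (PySem.List.pyRange 0 ((keys.length : Int) - 2) 1).any
      (fun i => PySem.List.pyGetD keys i "" == PySem.List.pyGetD keys (i + 2) "")

-- ===== PRECONDITION & SPEC =====
def Spec_detect_repetition_collapse_py (text : String) (out : Bool) : Prop := out = detect_repetition_collapse_py_alt text
instance (text : String) (out : Bool) : Decidable (Spec_detect_repetition_collapse_py text out) := by unfold Spec_detect_repetition_collapse_py; infer_instance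

-- ===== CLAIM (what is proved, stated in full; the proofs are below) =====
def Claim_equal_detect_repetition_collapse_py : Prop := ∀ (text : String), Dom_detect_repetition_collapse_py text → Spec_detect_repetition_collapse_py text (detect_repetition_collapse_py text)

-- ===== LEMMAS AND PROOFS =====

-- words produced by str.split() contain no space character
theorem pvGoNoSpace (s : List Char) : ∀ (cur : List Char) (acc : List (List Char)),
    ' ' ∉ cur → (∀ w ∈ acc, ' ' ∉ w) →
    ∀ w ∈ PySem.Chars.split₀.go s cur acc, ' ' ∉ w := by
  induction s with
  | nil =>
    intro cur acc hc ha w hw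
    unfold PySem.Chars.split₀.go at hw
    split at hw
    · exact ha w (List.mem_reverse.mp hw)
    · rcases List.mem_cons.mp (List.mem_reverse.mp hw) with h | h
      · subst h; simpa using hc
      · exact ha w h
  | cons c rest ih =>
    intro cur acc hc ha w hw
    unfold PySem.Chars.split₀.go at hw
    split at hw
    · split at hw
      · exact ih [] acc (by simp) ha w hw
      · refine ih [] (cur.reverse :: acc) (by simp) ?_ w hw
        intro v hv
        rcases List.mem_cons.mp hv with h | h
        · subst h; simpa using hc
        · exact ha v h
    · refine ih (c :: cur) acc ?_ ha w hw
      intro hmem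
      rcases List.mem_cons.mp hmem with h | h
      · rename_i hns; rw [← h] at hns; simp [PySem.Chars.isspace] at hns
      · exact hc h

theorem pvSplitNoSpace (text : String) : ∀ w ∈ PySem.Str.split₀ text, ' ' ∉ w.toList := by
  intro w hw
  rcases List.mem_map.mp hw with ⟨cs, hcs, rfl⟩
  rw [String.toList_ofList]
  exact pvGoNoSpace _ [] [] (by simp) (by simp) cs hcs

-- unique first-space split of a char list
theorem pvUniqueSplit : ∀ (a a' t t' : List Char), ' ' ∉ a → ' ' ∉ a' →
    a ++ ' ' :: t = a' ++ ' ' :: t' → a = a' ∧ t = t' := by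
  intro a
  induction a with
  | nil =>
    intro a' t t' _ ha' h
    cases a' with
    | nil => simpa using h
    | cons x xs =>
      simp at h
      exact absurd (h.1 ▸ List.mem_cons_self) ha'
  | cons x xs ih =>
    intro a' t t' ha ha' h
    cases a' with
    | nil =>
      simp at h
      exact absurd (h.1 ▸ List.mem_cons_self) ha
    | cons y ys =>
      simp at h
      obtain ⟨rfl, h2⟩ := h
      have := ih ys t t' (fun hm => ha (List.mem_cons_of_mem _ hm))
        (fun hm => ha' (List.mem_cons_of_mem _ hm)) h2
      simp [this.1, this.2]

-- the space-joined key is injective on triples whose first two components are space-free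
theorem pvKeyInj (s t : String × String × String)
    (h1 : ' ' ∉ s.1.toList) (h2 : ' ' ∉ s.2.1.toList)
    (h4 : ' ' ∉ t.1.toList) (h5 : ' ' ∉ t.2.1.toList)
    (h : pvJoinKey s = pvJoinKey t) : s = t := by
  obtain ⟨a, b, c⟩ := s
  obtain ⟨a', b', c'⟩ := t
  simp only [pvJoinKey] at h
  have h' := congrArg String.toList h
  rw [PySem.Str.toList_join, PySem.Str.toList_join] at h'
  simp only [List.map, PySem.Chars.join_cons_cons, PySem.Chars.join_singleton] at h'
  have hsep : (" " : String).toList = [' '] := rfl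
  rw [hsep] at h'
  have h'' : a.toList ++ ' ' :: (b.toList ++ ' ' :: c.toList)
      = a'.toList ++ ' ' :: (b'.toList ++ ' ' :: c'.toList) := by
    simpa using h'
  obtain ⟨e1, e2⟩ := pvUniqueSplit _ _ _ _ h1 h4 h''
  obtain ⟨e3, e4⟩ := pvUniqueSplit _ _ _ _ h2 h5 e2
  simp_all [String.toList_inj.symm]

-- A's index loop is a loop over the trigram list
def pvTgLoop (l : List (String × String × String))
    (seen : PySem.Dict (String × String × String) Int) : Bool :=
  match l with
  | [] => false
  | tg :: rest =>
    let c := seen.getD tg 0 + 1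
    if 3 ≤ c then true else pvTgLoop rest (seen.insert tg c)

theorem pvALoop_eq (words : List String) (idxs : List Int) (seen : PySem.Dict (String × String × String) Int) :
    pvALoop words idxs seen
      = pvTgLoop (idxs.map (fun i => (PySem.List.pyGetD words i "", PySem.List.pyGetD words (i + 1) "",
          PySem.List.pyGetD words (i + 2) ""))) seen := by
  induction idxs generalizing seen with
  | nil => rfl
  | cons i rest ih => simp [pvALoop, pvTgLoop, ih]

-- the count-and-early-exit loop detects exactly "some element reaches 3"
theorem pvTgLoop_iff (l : List (String × String × String)) :
    ∀ seen, pvTgLoop l seen = true ↔ ∃ x ∈ l, 3 ≤ seen.getD x 0 + (l.count x : Int) := by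
  induction l with
  | nil => intro seen; simp [pvTgLoop]
  | cons a rest ih =>
    intro seen
    simp only [pvTgLoop]
    by_cases hc : (3 : Int) ≤ seen.getD a 0 + 1
    · simp only [if_pos hc]
      constructor
      · intro _
        refine ⟨a, List.mem_cons_self, ?_⟩
        have : (0 : Int) ≤ (rest.count a : Int) := Int.natCast_nonneg _
        have hcount : ((a :: rest).count a : Int) = (rest.count a : Int) + 1 := by
          simp
        omega
      · intro _; trivial
    · simp only [if_neg hc]
      rw [ih]
      constructor
      · rintro ⟨x, hx, hge⟩
        by_cases hxa : x = a
        · subst hxa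
          refine ⟨x, List.mem_cons_self, ?_⟩
          rw [PySem.Dict.getD_insert, if_pos rfl] at hge
          have : ((x :: rest).count x : Int) = (rest.count x : Int) + 1 := by simp
          omega
        · refine ⟨x, List.mem_cons_of_mem _ hx, ?_⟩
          rw [PySem.Dict.getD_insert, if_neg hxa] at hge
          have : ((a :: rest).count x : Int) = (rest.count x : Int) := by
            simp [List.count_cons]; exact fun h => absurd h.symm hxa
          omega
      · rintro ⟨x, hx, hge⟩
        by_cases hxa : x = a
        · subst hxa
          have hcnt : ((x :: rest).count x : Int) = (rest.count x : Int) + 1 := by simp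
          have hmem : x ∈ rest := by
            by_contra hnm
            have : rest.count x = 0 := List.count_eq_zero.mpr hnm
            omega
          refine ⟨x, hmem, ?_⟩
          rw [PySem.Dict.getD_insert, if_pos rfl]
          omega
        · rcases List.mem_cons.mp hx with h | h
          · exact absurd h hxa
          refine ⟨x, h, ?_⟩
          rw [PySem.Dict.getD_insert, if_neg hxa]
          have : ((a :: rest).count x : Int) = (rest.count x : Int) := by
            simp [List.count_cons]; exact fun h => absurd h.symm hxa
          omega

-- the index-built trigram list is the zip-built one
theorem pvTrigramsEq (w : List String) :
    (PySem.List.pyRange 0 ((w.length : Int) - 2) 1).map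
        (fun i => (PySem.List.pyGetD w i "", PySem.List.pyGetD w (i + 1) "",
                   PySem.List.pyGetD w (i + 2) ""))
      = w.zip ((w.drop 1).zip (w.drop 2)) := by
  apply List.ext_getElem
  · simp [PySem.List.length_pyRange_one]
    omega
  · intro k h1 h2
    simp only [List.getElem_map, PySem.List.getElem_pyRange_one, List.getElem_zip]
    have hlen : (PySem.List.pyRange 0 ((w.length : Int) - 2) 1).length = w.length - 2 := by
      simp [PySem.List.length_pyRange_one]; omega
    rw [List.length_map, hlen] at h1
    have e1 : PySem.List.pyGetD w (0 + (k : Int)) "" = w[k]'(by omega) := by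
      rw [PySem.List.pyGetD_eq_getElem w "" (by omega) (by omega)]
      congr 1; omega
    have e2 : PySem.List.pyGetD w (0 + (k : Int) + 1) "" = w[k + 1]'(by omega) := by
      rw [PySem.List.pyGetD_eq_getElem w "" (by omega) (by omega)]
      congr 1; omega
    have e3 : PySem.List.pyGetD w (0 + (k : Int) + 2) "" = w[k + 2]'(by omega) := by
      rw [PySem.List.pyGetD_eq_getElem w "" (by omega) (by omega)]
      congr 1; omega
    rw [e1, e2, e3]
    simp only [List.getElem_drop, Prod.mk.injEq]
    refine ⟨trivial, ?_, ?_⟩ <;> (congr 1; omega)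

-- in a ≤-sorted list, "two equal entries two apart" is "some value occurs 3+ times"
theorem pvSortedScan (l : List String) (hp : l.Pairwise (· ≤ ·)) :
    (∃ k, ∃ h : k + 2 < l.length, l[k]'(by omega) = l[k + 2]'h) ↔ ∃ x, 3 ≤ l.count x := by
  have hmono : ∀ (i j : Nat) (hi : i < l.length) (hj : j < l.length), i ≤ j → l[i] ≤ l[j] := by
    intro i j hi hj hij
    rcases Nat.lt_or_ge i j with h | h
    · exact (List.pairwise_iff_getElem.mp hp) i j hi hj h
    · have : i = j := by omega
      subst this; rfl
  constructor
  · rintro ⟨k, h, heq⟩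
    refine ⟨l[k]'(by omega), ?_⟩
    rw [← List.replicate_sublist_iff]
    have h1 : l[k + 1]'(by omega) = l[k]'(by omega) := by
      have a1 := hmono k (k + 1) (by omega) (by omega) (by omega)
      have a2 := hmono (k + 1) (k + 2) (by omega) (by omega) (by omega)
      rw [heq] at a1
      exact le_antisymm a2 a1 |>.trans heq.symm
    have hdrop : l.drop k = l[k]'(by omega) :: l[k + 1]'(by omega) :: l[k + 2]'(by omega) :: l.drop (k + 3) := by
      rw [List.drop_eq_getElem_cons (by omega), List.drop_eq_getElem_cons (by omega),
          List.drop_eq_getElem_cons (by omega)]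
    have : List.Sublist (List.replicate 3 (l[k]'(by omega))) (l.drop k) := by
      rw [hdrop, h1, ← heq]
      simp [List.replicate_succ]
    exact this.trans (List.drop_sublist k l)
  · rintro ⟨x, hcnt⟩
    have hsub : List.Sublist (List.replicate 3 x) l := List.replicate_sublist_iff.mpr hcnt
    obtain ⟨is, his, hpw⟩ := List.sublist_eq_map_getElem hsub
    have hlen3 : is.length = 3 := by
      have := congrArg List.length his; simp at this; omega
    obtain ⟨i1, i2, i3, rfl⟩ : ∃ a b c, is = [a, b, c] := by
      match is, hlen3 with
      | [a, b, c], _ => exact ⟨a, b, c, rfl⟩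
    simp only [List.map, List.replicate, List.cons.injEq] at his
    obtain ⟨e1, e2, e3, -⟩ := his
    simp only [List.pairwise_cons, List.mem_cons] at hpw
    have h12 : i1 < i2 := by
      have := hpw.1 i2; simp at this; omega
    have h23 : i2 < i3 := by
      have := hpw.2.1 i3; simp at this; omega
    have hi3 : (i3 : Nat) < l.length := i3.2
    refine ⟨i1, by omega, ?_⟩
    have b1 := hmono i1 (i1 + 2) (by omega) (by omega) (by omega)
    have b2 := hmono (i1 + 2) i3 (by omega) hi3 (by omega)
    have e3' : x = l[(i3 : Nat)]'hi3 := e3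
    have e1' : x = l[(i1 : Nat)]'(by omega) := e1
    rw [← e3', e1'] at b2
    exact le_antisymm b1 b2

theorem pvCountMap (l : List (String × String × String)) (f : String × String × String → String) (x : String) :
    (l.map f).count x = l.countP (fun a => f a == x) := by
  induction l with
  | nil => rfl
  | cons a t ih => simp [List.count_cons, List.countP_cons, ih, beq_iff_eq]

-- transfer "some trigram occurs 3+ times" through the injective key map
theorem pvCountTransfer (ts : List (String × String × String))
    (hfree : ∀ t ∈ ts, ' ' ∉ t.1.toList ∧ ' ' ∉ t.2.1.toList) :
    (∃ tg ∈ ts, 3 ≤ ts.count tg) ↔ ∃ x, 3 ≤ (ts.map pvJoinKey).count x := by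
  constructor
  · rintro ⟨tg, htg, hc⟩
    refine ⟨pvJoinKey tg, ?_⟩
    rw [pvCountMap]
    have : ts.count tg ≤ ts.countP (fun a => pvJoinKey a == pvJoinKey tg) := by
      have hcc : ts.count tg = ts.countP (· == tg) := rfl
      rw [hcc]
      apply List.countP_mono_left
      intro a _ h
      have : a = tg := by simpa using h
      simp [this]
    omega
  · rintro ⟨x, hc⟩
    rw [pvCountMap] at hc
    have hpos : 0 < ts.countP (fun a => pvJoinKey a == x) := by omega
    obtain ⟨tg, htg, hx⟩ := List.countP_pos_iff.mp hpos
    have hx' : pvJoinKey tg = x := by simpa using hx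
    refine ⟨tg, htg, ?_⟩
    have hcong : ts.countP (fun a => pvJoinKey a == x) = ts.countP (· == tg) := by
      apply List.countP_congr
      intro a ha
      simp only [beq_iff_eq]
      constructor
      · intro h
        exact pvKeyInj a tg (hfree a ha).1 (hfree a ha).2 (hfree tg htg).1 (hfree tg htg).2 (h.trans hx'.symm)
      · intro h; subst h; exact hx'
    have hcnt : ts.count tg = ts.countP (· == tg) := rfl
    omega

-- ===== VERDICT (by name: the statement is the Claim_ definition above) =====
theorem detect_repetition_collapse_py_spec : Claim_equal_detect_repetition_collapse_py := by
  intro text _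
  unfold Spec_detect_repetition_collapse_py detect_repetition_collapse_py detect_repetition_collapse_py_alt
  set words := PySem.Str.split₀ text with hwords
  by_cases hlen : ((words.length : Int) < 9)
  · simp [hlen]
  · simp only [if_neg hlen]
    have hs1 : PySem.List.slice words (some 1) none = words.drop 1 := by
      rw [PySem.List.slice_from words (by norm_num)]; rfl
    have hs2 : PySem.List.slice words (some 2) none = words.drop 2 := by
      rw [PySem.List.slice_from words (by norm_num)]; rfl
    rw [hs1, hs2]
    set ts := words.zip ((words.drop 1).zip (words.drop 2)) with hts
    set keys := PySem.List.sorted (ts.map pvJoinKey) (fun k => k) false with hkeys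
    have hfree : ∀ t ∈ ts, ' ' ∉ t.1.toList ∧ ' ' ∉ t.2.1.toList := by
      intro t ht
      obtain ⟨a, b, c⟩ := t
      obtain ⟨ha, hbc⟩ := List.of_mem_zip ht
      obtain ⟨hb, _⟩ := List.of_mem_zip hbc
      exact ⟨pvSplitNoSpace text a ha, pvSplitNoSpace text b (List.mem_of_mem_drop hb)⟩
    have hA : pvALoop words (PySem.List.pyRange 0 ((words.length : Int) - 2) 1) PySem.Dict.empty = true
        ↔ ∃ tg ∈ ts, 3 ≤ ts.count tg := by
      rw [pvALoop_eq, pvTrigramsEq, ← hts, pvTgLoop_iff]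
      constructor <;> rintro ⟨x, hx, h⟩ <;> refine ⟨x, hx, ?_⟩ <;>
        simp only [PySem.Dict.getD_empty, zero_add] at * <;> omega
    have hperm : (ts.map pvJoinKey).Perm keys := (PySem.List.sorted_perm (ts.map pvJoinKey) (fun k => k) false).symm
    have hpair : keys.Pairwise (· ≤ ·) := PySem.List.sorted_pairwise (ts.map pvJoinKey) (fun k => k)
    have hB : ((PySem.List.pyRange 0 ((keys.length : Int) - 2) 1).any
          (fun i => PySem.List.pyGetD keys i "" == PySem.List.pyGetD keys (i + 2) "")) = true
        ↔ ∃ x, 3 ≤ keys.count x := by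
      rw [List.any_eq_true, ← pvSortedScan keys hpair]
      constructor
      · rintro ⟨i, hi, heq⟩
        obtain ⟨hi0, hi1⟩ := PySem.List.mem_pyRange_one.mp hi
        have heq' : PySem.List.pyGetD keys i "" = PySem.List.pyGetD keys (i + 2) "" := beq_iff_eq.mp heq
        rw [PySem.List.pyGetD_eq_getElem keys "" (by omega) (by omega),
            PySem.List.pyGetD_eq_getElem keys "" (by omega) (by omega)] at heq'
        refine ⟨i.toNat, by omega, ?_⟩
        convert heq' using 2
        omega
      · rintro ⟨k, hk, heq⟩
        refine ⟨(k : Int), PySem.List.mem_pyRange_one.mpr (by omega), ?_⟩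
        rw [PySem.List.pyGetD_eq_getElem keys "" (by omega) (by omega),
            PySem.List.pyGetD_eq_getElem keys "" (by omega) (by omega)]
        apply beq_iff_eq.mpr
        convert heq using 2
    have hcnt : ∀ x, keys.count x = (ts.map pvJoinKey).count x := fun x => hperm.symm.count_eq x
    rw [Bool.eq_iff_iff, hA, hB]
    rw [pvCountTransfer ts hfree]
    constructor <;> rintro ⟨x, hx⟩ <;> exact ⟨x, by rw [hcnt] at *; omega⟩
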